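-- pv_equiv track=rewrite | github.com/NVIDIA/skills | skills/TileGym/cutile-python/examples/convolution/conv_transpose_2d.py | _select_tile_config_trans2d
-- ===== SOURCE A (Python) =====
-- def next_power_of_2(x: int) -> int:
--     """Return the smallest power of 2 >= x."""
--     if x == 0:
--         return 1
--     return 1 << (x - 1).bit_length()
--
-- def _select_tile_config_trans2d(M_total, C_out, K_total, ocpg):
--     """Heuristic tile config selection based on problem dimensions.
--
--     Key insights from systematic tuning on Blackwell (150 SMs):
--     - TILE_N = min(C_out, 256) maximises output-channel reuse per M-tile
--     - TILE_M x TILE_K ~ 4096 is the optimal gather footprint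
--     - L2 swizzle (GROUP_SIZE_M) helps when num_tiles_m is large
--     """
--     # -- TILE_N: cover as many output channels as possible --
--     TILE_N = min(C_out, 256)
--     # Round down to power of 2
--     tn = 1
--     while tn * 2 <= TILE_N:
--         tn *= 2
--     TILE_N = tn
--
--     # Groups correctness: TILE_N must not exceed C_out_per_group
--     if TILE_N > ocpg:
--         TILE_N = next_power_of_2(ocpg)
--         while TILE_N > ocpg:
--             TILE_N //= 2
--
--     # -- TILE_M + TILE_K: jointly selected --
--     # Key insight: optimal gather footprint is ~4096 elements per iteration
--     # (TILE_M x TILE_K ~ 4096). This balances cache line utilisation with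
--     # register pressure.
--     if M_total >= 10000:
--         TILE_M = 256
--         TILE_K = 16  # 256 x 16 = 4096 elements per gather
--     elif M_total >= 1000:
--         TILE_M = 128
--         TILE_K = 32  # 128 x 32 = 4096 elements per gather
--     else:
--         TILE_M = 64
--         TILE_K = 32  # 64 x 32 = 2048 (small problem, keep simple)
--
--     GROUP_SIZE_M = 8
--
--     return TILE_M, TILE_N, TILE_K, GROUP_SIZE_M
-- ===== SOURCE B (Python) =====
-- def _select_tile_config_trans2d(M_total, C_out, K_total, ocpg):
--     """Heuristic tile config selection based on problem dimensions.
--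
--     TILE_N is the largest power of two not exceeding all three bounds at once
--     (output channels, 256, channels per group), computed in closed form from
--     the bit length instead of A's two rounding loops.
--     """
--     cap = min(max(C_out, 1), 256, ocpg)
--     tile_n = 0 if cap <= 0 else 1 << (cap.bit_length() - 1)
--     tile_m, tile_k = (256, 16) if M_total >= 10000 else (128, 32) if M_total >= 1000 else (64, 32)
--     return tile_m, tile_n, tile_k, 8
-- ===== Notes on version B (the rewrite author's own statement) =====
-- stated objective: simpler
-- what changed: TILE_N is computed in closed form as the largest power of two below a single combined bound min(max(C_out,1),256,ocpg) via bit_length, replacing A's doubling loop, next_power_of_2 helper and conditional re-clamping halving loop; the TILE_M/TILE_K selection becomes one conditional expression.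
import Mathlib
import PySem

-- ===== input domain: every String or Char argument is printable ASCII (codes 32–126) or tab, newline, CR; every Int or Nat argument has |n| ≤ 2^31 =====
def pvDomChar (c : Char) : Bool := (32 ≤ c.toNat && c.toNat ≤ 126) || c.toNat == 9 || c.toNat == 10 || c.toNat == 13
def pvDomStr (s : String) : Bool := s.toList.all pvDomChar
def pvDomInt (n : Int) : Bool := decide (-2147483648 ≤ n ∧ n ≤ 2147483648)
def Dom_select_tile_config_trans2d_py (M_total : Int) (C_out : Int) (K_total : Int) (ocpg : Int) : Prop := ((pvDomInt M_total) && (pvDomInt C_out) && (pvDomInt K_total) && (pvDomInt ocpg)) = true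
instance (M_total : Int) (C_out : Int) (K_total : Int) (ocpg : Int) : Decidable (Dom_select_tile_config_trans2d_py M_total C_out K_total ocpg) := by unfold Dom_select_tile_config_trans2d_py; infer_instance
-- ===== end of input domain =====

-- B replaces A's two TILE_N rounding loops (power-of-2 round-down, then conditional
-- next_power_of_2-and-halve re-clamp) by one closed-form "largest power of two not
-- exceeding a single combined bound" computed from the bit length (objective: simpler).

-- ===== PORT A =====
-- helper next_power_of_2 from Source A: 1 << (x-1).bit_length(), or 1 for x = 0
def next_power_of_2 (x : Int) : Int := if x = 0 then 1 else (2 : Int) ^ PySem.Int.bitLength (x - 1)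

-- 'while tn * 2 <= TILE_N: tn *= 2' — fuel only makes the loop total; 16 doublings
-- are never exhausted since TILE_N ≤ 256
def tnLoop : Nat → Int → Int → Int
  | 0, tn, _ => tn
  | f + 1, tn, T => if tn * 2 ≤ T then tnLoop f (tn * 2) T else tn

-- 'while TILE_N > ocpg: TILE_N //= 2' — fuel only makes the loop total; for ocpg ≥ 0
-- (Pre_) 64 halvings are never exhausted
def halveLoop : Nat → Int → Int → Int
  | 0, n, _ => n
  | f + 1, n, ocpg => if n > ocpg then halveLoop f (PySem.Int.floordiv n 2) ocpg else n

def select_tile_config_trans2d_py (M_total : Int) (C_out : Int) (K_total : Int) (ocpg : Int) : Int × Int × Int × Int :=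
  let tn : Int := tnLoop 16 1 (min C_out 256)
  let TILE_N : Int := if tn > ocpg then halveLoop 64 (next_power_of_2 ocpg) ocpg else tn
  if M_total ≥ 10000 then (256, TILE_N, 16, 8)
  else if M_total ≥ 1000 then (128, TILE_N, 32, 8)
  else (64, TILE_N, 32, 8)

-- ===== PORT B =====
def select_tile_config_trans2d_py_alt (M_total : Int) (C_out : Int) (K_total : Int) (ocpg : Int) : Int × Int × Int × Int :=
  let cap : Int := min (min (max C_out 1) 256) ocpg
  let tile_n : Int := if cap ≤ 0 then 0 else (2 : Int) ^ (PySem.Int.bitLength cap - 1)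
  let mk : Int × Int := if M_total ≥ 10000 then (256, 16) else if M_total ≥ 1000 then (128, 32) else (64, 32)
  (mk.1, tile_n, mk.2, 8)

-- ===== PRECONDITION & SPEC =====
-- Pre_ excludes ocpg < 0, on which A never returns: its halving loop 'while TILE_N > ocpg'
-- keeps TILE_N at 0 forever once it reaches 0, so A diverges there.
def Pre_select_tile_config_trans2d_py (M_total : Int) (C_out : Int) (K_total : Int) (ocpg : Int) : Prop := 0 ≤ ocpg
instance (M_total : Int) (C_out : Int) (K_total : Int) (ocpg : Int) : Decidable (Pre_select_tile_config_trans2d_py M_total C_out K_total ocpg) := by unfold Pre_select_tile_config_trans2d_py; infer_instance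

def pvWitness_select_tile_config_trans2d_py : Int × Int × Int × Int := (2000, 100, 9, 8)

def Spec_select_tile_config_trans2d_py (M_total : Int) (C_out : Int) (K_total : Int) (ocpg : Int) (out : Int × Int × Int × Int) : Prop := out = select_tile_config_trans2d_py_alt M_total C_out K_total ocpg
instance (M_total : Int) (C_out : Int) (K_total : Int) (ocpg : Int) (out : Int × Int × Int × Int) : Decidable (Spec_select_tile_config_trans2d_py M_total C_out K_total ocpg out) := by unfold Spec_select_tile_config_trans2d_py; infer_instance

-- ===== CLAIM (what is proved, stated in full; the proofs are below) =====
def Claim_equal_select_tile_config_trans2d_py : Prop := ∀ (M_total : Int) (C_out : Int) (K_total : Int) (ocpg : Int), Dom_select_tile_config_trans2d_py M_total C_out K_total ocpg → Pre_select_tile_config_trans2d_py M_total C_out K_total ocpg → Spec_select_tile_config_trans2d_py M_total C_out K_total ocpg (select_tile_config_trans2d_py M_total C_out K_total ocpg)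

-- ===== LEMMAS AND PROOFS =====

lemma int_two_pow (k : Nat) : ((2 ^ k : Nat) : Int) = (2 : Int) ^ k := by norm_cast

-- Python bit_length of a positive int is ⌊log2⌋ + 1.
lemma bitLength_eq_log (n : Int) (h : 1 ≤ n) :
    PySem.Int.bitLength n = Nat.log 2 n.toNat + 1 := by
  have h1 := PySem.Int.lt_two_pow_bitLength n
  have h2 := PySem.Int.two_pow_bitLength_le n (by omega)
  have habs : n.natAbs = n.toNat := by omega
  rw [habs] at h1 h2
  have hbl : 1 ≤ PySem.Int.bitLength n := by
    rcases Nat.eq_zero_or_pos (PySem.Int.bitLength n) with h0 | h0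
    · rw [h0] at h1; simp at h1; omega
    · exact h0
  have hlog := Nat.log_eq_of_pow_le_of_lt_pow (m := PySem.Int.bitLength n - 1) h2
    (by rwa [Nat.sub_add_cancel hbl])
  omega

-- The doubling loop returns tn·2^j with tn·2^j ≤ T < tn·2^(j+1), provided the fuel suffices.
lemma tnLoop_spec : ∀ (f : Nat) (tn T : Int), 1 ≤ tn → tn ≤ T → T < tn * 2 ^ f →
    ∃ j : Nat, tnLoop f tn T = tn * 2 ^ j ∧ tn * 2 ^ j ≤ T ∧ T < tn * 2 ^ (j + 1) := by
  intro f
  induction f with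
  | zero => intro tn T h1 h2 h3; simp at h3; omega
  | succ f ih =>
    intro tn T h1 h2 h3
    rw [tnLoop]
    by_cases h : tn * 2 ≤ T
    · simp only [h, if_true]
      obtain ⟨j, hj, hle, hlt⟩ := ih (tn * 2) T (by omega) h
        (by rw [pow_succ] at h3; linarith)
      exact ⟨j + 1, by rw [hj]; ring_nf, by rw [pow_succ] at *; linarith [hle],
        by rw [pow_succ, pow_succ] at *; linarith [hlt]⟩
    · simp only [h, if_false]
      exact ⟨0, by ring_nf, by simpa using h2, by rw [pow_one]; omega⟩

lemma tnLoop_le_one (T : Int) (h : T ≤ 1) : tnLoop 16 1 T = 1 := by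
  rw [tnLoop]; simp only [one_mul]
  rw [if_neg (by omega)]

-- Nat-level core: A's conditional rounding of a against b equals the largest
-- power of two ≤ min a b.
lemma nat_core (a b : Nat) (ha : 1 ≤ a) (hb : 1 ≤ b) :
    (if b < 2 ^ Nat.log 2 a then 2 ^ Nat.log 2 b else 2 ^ Nat.log 2 a)
      = 2 ^ Nat.log 2 (min a b) := by
  rcases le_total a b with hab | hba
  · rw [min_eq_left hab,
      if_neg (not_lt.mpr (le_trans (Nat.pow_log_le_self 2 (by omega)) hab))]
  · rw [min_eq_right hba]
    by_cases h : b < 2 ^ Nat.log 2 a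
    · rw [if_pos h]
    · rw [if_neg h]
      push_neg at h
      have h1 : Nat.log 2 a ≤ Nat.log 2 b := (Nat.le_log_iff_pow_le (by norm_num) (by omega)).mpr h
      have h2 : Nat.log 2 b ≤ Nat.log 2 a := Nat.log_mono_right hba
      rw [le_antisymm h1 h2]

-- A's next_power_of_2-then-halve pass computes the largest power of two ≤ ocpg ≥ 1.
lemma halve_spec (ocpg : Int) (h1 : 1 ≤ ocpg) :
    halveLoop 64 (next_power_of_2 ocpg) ocpg = (2 : Int) ^ Nat.log 2 ocpg.toNat := by
  by_cases h2 : ocpg = 1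
  · subst h2; decide
  · have hocpg2 : 2 ≤ ocpg := by omega
    set n : Nat := ocpg.toNat with hn
    have hn2 : 2 ≤ n := by omega
    have ht : (ocpg - 1).toNat = n - 1 := by omega
    set L : Nat := Nat.log 2 (n - 1) with hL
    have hnp : next_power_of_2 ocpg = (2 : Int) ^ (L + 1) := by
      rw [next_power_of_2, if_neg (by omega), bitLength_eq_log _ (by omega), ht]
    have hlow : 2 ^ L ≤ n - 1 := Nat.pow_log_le_self 2 (by omega)
    have hhigh : n - 1 < 2 ^ (L + 1) := Nat.lt_pow_succ_log_self (by norm_num) _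
    have hcast : ocpg = (n : Int) := by omega
    rw [hnp]
    by_cases heq : n = 2 ^ (L + 1)
    · rw [halveLoop, if_neg (by rw [← int_two_pow, ← heq]; omega)]
      rw [show Nat.log 2 n = L + 1 by rw [heq, Nat.log_pow (by norm_num)]]
    · have hlt : n < 2 ^ (L + 1) := by omega
      rw [halveLoop, if_pos (by rw [← int_two_pow]; omega)]
      have hfd : PySem.Int.floordiv ((2 : Int) ^ (L + 1)) 2 = (2 : Int) ^ L := by
        rw [pow_succ, PySem.Int.floordiv_eq_ediv_of_pos (by norm_num)]
        exact Int.mul_ediv_cancel _ (by norm_num)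
      rw [hfd, halveLoop, if_neg (by rw [← int_two_pow]; omega)]
      rw [Nat.log_eq_of_pow_le_of_lt_pow (by omega) hlt]

-- TILE_N agreement for ocpg ≥ 0: A's two-stage rounding equals B's closed form.
lemma tileN_eq (C_out ocpg : Int) (h0 : 0 ≤ ocpg) :
    (if tnLoop 16 1 (min C_out 256) > ocpg
       then halveLoop 64 (next_power_of_2 ocpg) ocpg
       else tnLoop 16 1 (min C_out 256))
    = (if min (min (max C_out 1) 256) ocpg ≤ 0 then 0
       else (2 : Int) ^ (PySem.Int.bitLength (min (min (max C_out 1) 256) ocpg) - 1)) := by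
  by_cases hz : ocpg = 0
  · -- cap ≤ 0; A's first stage gives a positive power of two, the halve pass ends at 0
    subst hz
    rw [if_pos (min_le_right _ _)]
    have hz0 : halveLoop 64 (next_power_of_2 0) 0 = 0 := by decide
    by_cases hT : min C_out 256 ≤ 1
    · rw [tnLoop_le_one _ hT, if_pos (by omega), hz0]
    · obtain ⟨j, hj, _, _⟩ := tnLoop_spec 16 1 (min C_out 256) (by omega) (by omega)
        (by have e : (1 : Int) * 2 ^ 16 = 65536 := by norm_num
            have := min_le_right C_out (256 : Int); omega)
      rw [hj, if_pos (by simp only [one_mul]; positivity), hz0]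
  · have h1 : 1 ≤ ocpg := by omega
    by_cases hT : min C_out 256 ≤ 1
    · -- C_out ≤ 1: A's first stage floors at 1 and cap = 1
      have hC : C_out ≤ 1 := by
        by_contra hh; push_neg at hh
        have := le_min (by omega : (2 : Int) ≤ C_out) (by norm_num : (2 : Int) ≤ 256)
        omega
      have hcap : min (min (max C_out 1) 256) ocpg = 1 := by
        rw [max_eq_right hC, min_eq_left (by norm_num : (1 : Int) ≤ 256)]
        exact min_eq_left h1
      rw [tnLoop_le_one _ hT, hcap, if_neg (by omega), if_neg (by norm_num)]
      decide
    · -- C_out ≥ 2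
      push_neg at hT
      have hC2 : 2 ≤ C_out := by have := min_le_left C_out (256 : Int); omega
      have hT256 : min C_out 256 ≤ 256 := min_le_right _ _
      obtain ⟨j, hj, hle, hlt⟩ := tnLoop_spec 16 1 (min C_out 256) (by omega) (by omega)
        (by have e : (1 : Int) * 2 ^ 16 = 65536 := by norm_num
            have := min_le_right C_out (256 : Int); omega)
      simp only [one_mul] at hj hle hlt
      set a : Nat := (min C_out 256).toNat with ha
      set b : Nat := ocpg.toNat with hb
      have ha2 : 2 ≤ a := by omega
      have hb1 : 1 ≤ b := by omega
      have haj : Nat.log 2 a = j :=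
        Nat.log_eq_of_pow_le_of_lt_pow
          (by have := int_two_pow j; omega)
          (by have := int_two_pow (j + 1); omega)
      have hcap : min (min (max C_out 1) 256) ocpg = ((min a b : Nat) : Int) := by
        rw [max_eq_left (by omega : (1 : Int) ≤ C_out), Nat.cast_min]
        have e1 : ((a : Nat) : Int) = min C_out 256 := by omega
        have e2 : ((b : Nat) : Int) = ocpg := by omega
        rw [e1, e2]
      have hmin1 : 1 ≤ min a b := le_min (by omega) hb1
      have hbit : PySem.Int.bitLength ((min a b : Nat) : Int) - 1 = Nat.log 2 (min a b) := by
        rw [bitLength_eq_log _ (by omega), Int.toNat_natCast, Nat.add_sub_cancel]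
      have hRHS : ¬ ((min a b : Nat) : Int) ≤ 0 := by have := hmin1; omega
      rw [hcap, hj]
      have hcore := nat_core a b (by omega) hb1
      rw [haj] at hcore
      by_cases hcond : (2 : Int) ^ j > ocpg
      · rw [if_pos hcond, if_neg hRHS, hbit, halve_spec ocpg h1, ← hb]
        rw [if_pos (by have := int_two_pow j; omega)] at hcore
        have := congrArg (fun k : Nat => (k : Int)) hcore
        push_cast at this
        exact this
      · rw [if_neg hcond, if_neg hRHS, hbit]
        rw [if_neg (by have := int_two_pow j; omega)] at hcore
        have := congrArg (fun k : Nat => (k : Int)) hcore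
        push_cast at this
        exact this

-- ===== VERDICT (by name: the statement is the Claim_ definition above) =====
theorem select_tile_config_trans2d_py_spec : Claim_equal_select_tile_config_trans2d_py := by
  intro M_total C_out K_total ocpg _ hpre
  unfold Spec_select_tile_config_trans2d_py
  simp only [select_tile_config_trans2d_py, select_tile_config_trans2d_py_alt]
  rw [tileN_eq C_out ocpg hpre]
  split_ifs <;> rfl
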